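-- pv_equiv track=rewrite | github.com/dguest/susy-analysis | python3/scharm/aggregate/fitinputs.py | _sort_sym_asym
-- ===== SOURCE A (Python) =====
-- _up_var_prefix = 'up'
--
-- _down_var_prefix = 'down'
--
-- def _sort_sym_asym(yields):
--     """takes output from _yield_systematics, gets sym / asym keys"""
--     uvp = _up_var_prefix
--     dvp = _down_var_prefix
--     udvar = {y[:-len(uvp)] for y in yields if y.endswith(uvp)}
--     udvar_dn_check = {y[:-len(dvp)] for y in yields if y.endswith(dvp)}
--     if udvar != udvar_dn_check:
--         raise ValueError('found unmatched up ({}) or down ({})'.format(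
--                 ', '.join(udvar), ', '.join(udvar_dn_check)))
--     sym_keys = {x + y for x in udvar for y in [dvp, uvp]}
--     return set(yields.keys()) - sym_keys, udvar
-- ===== SOURCE B (Python) =====
-- def _sort_sym_asym(yields):
--     """takes output from _yield_systematics, gets sym / asym keys"""
--     other = set()
--     bases = set()
--     for y in yields:
--         if y.endswith('up'):
--             if y[:-2] + 'down' not in yields:
--                 raise ValueError(
--                     'found unmatched up ({}) or down ()'.format(y[:-2]))
--             bases.add(y[:-2])
--         elif y.endswith('down'):
--             if y[:-4] + 'up' not in yields:
--                 raise ValueError(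
--                     'found unmatched up () or down ({})'.format(y[:-4]))
--         else:
--             other.add(y)
--     return other, bases
-- ===== Notes on version B (the rewrite author's own statement) =====
-- stated objective: alternative
-- what changed: Instead of building two base-sets from staged comprehensions, comparing them, reconstructing the sym_keys product set and subtracting it, B does one pass that checks each up/down key's complementary partner key by hash lookup in the original dict (raising eagerly on a missing partner) and accumulates the other keys and up-bases directly.
import Mathlib
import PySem

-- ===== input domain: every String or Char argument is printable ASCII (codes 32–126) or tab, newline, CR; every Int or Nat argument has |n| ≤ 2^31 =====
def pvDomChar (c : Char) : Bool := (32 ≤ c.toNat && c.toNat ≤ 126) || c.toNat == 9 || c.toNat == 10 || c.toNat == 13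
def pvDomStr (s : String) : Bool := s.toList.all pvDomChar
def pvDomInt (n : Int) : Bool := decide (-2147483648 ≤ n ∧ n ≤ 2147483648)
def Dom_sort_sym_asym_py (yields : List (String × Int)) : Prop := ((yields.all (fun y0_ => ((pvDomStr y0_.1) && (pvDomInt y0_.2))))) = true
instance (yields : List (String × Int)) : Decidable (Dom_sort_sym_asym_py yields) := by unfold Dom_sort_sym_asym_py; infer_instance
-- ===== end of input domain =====

-- B replaces A's staged base-set comprehensions, set comparison, sym_keys reconstruction and set
-- difference by a single pass that hash-looks-up each up/down key's partner key in the dict itself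
-- (objective: alternative). Return-value equivalence only; neither version mutates its argument.

-- ===== PORT A =====
def sort_sym_asym_py (yields : List (String × Int)) : List String × List String :=
  let d := PySem.Dict.ofList yields
  let udvar : PySem.Set String :=
    PySem.Set.ofList ((d.keys.filter (fun y => PySem.Str.endswith y "up")).map
      (fun y => PySem.Str.slice y none (some (-2))))
  let _udvar_dn_check : PySem.Set String :=
    PySem.Set.ofList ((d.keys.filter (fun y => PySem.Str.endswith y "down")).map
      (fun y => PySem.Str.slice y none (some (-4))))
  -- 'if udvar != udvar_dn_check: raise ValueError(…)': A raises exactly outside Pre_, where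
  -- this port's value is never claimed
  let sym_keys : PySem.Set String :=
    PySem.Set.ofList (udvar.flatMap (fun x => [x ++ "down", x ++ "up"]))
  (PySem.Set.diff (PySem.Set.ofList d.keys) sym_keys, udvar)

-- ===== PORT B =====
-- the loop raises mid-iteration on a missing partner: modelled by an Option state (none =
-- ValueError path, excluded by Pre_, where ([], []) is never claimed)
def sort_sym_asym_py_alt (yields : List (String × Int)) : List String × List String :=
  let d := PySem.Dict.ofList yields
  let st := d.keys.foldl
    (fun (st : Option (PySem.Set String × PySem.Set String)) (y : String) =>
      match st with
      | none => none
      | some (other, bases) =>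
        if PySem.Str.endswith y "up" then
          if d.contains (PySem.Str.slice y none (some (-2)) ++ "down") then
            some (other, PySem.Set.add bases (PySem.Str.slice y none (some (-2))))
          else none  -- raise ValueError
        else if PySem.Str.endswith y "down" then
          if d.contains (PySem.Str.slice y none (some (-4)) ++ "up") then
            some (other, bases)
          else none  -- raise ValueError
        else
          some (PySem.Set.add other y, bases))
    (some (PySem.Set.empty, PySem.Set.empty))
  match st with
  | some (other, bases) => (other, bases)
  | none => ([], [])

-- ===== PRECONDITION & SPEC =====
-- Pre_ excludes exactly the inputs on which both Pythons raise ValueError: those whose set of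
-- bases of keys ending in 'up' differs from the set of bases of keys ending in 'down'.
def Pre_sort_sym_asym_py (yields : List (String × Int)) : Prop :=
  PySem.Set.equal
    (PySem.Set.ofList (((PySem.Dict.ofList yields).keys.filter
        (fun y => PySem.Str.endswith y "up")).map (fun y => PySem.Str.slice y none (some (-2)))))
    (PySem.Set.ofList (((PySem.Dict.ofList yields).keys.filter
        (fun y => PySem.Str.endswith y "down")).map (fun y => PySem.Str.slice y none (some (-4))))) = true
instance (yields : List (String × Int)) : Decidable (Pre_sort_sym_asym_py yields) := by
  unfold Pre_sort_sym_asym_py; infer_instance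

def pvWitness_sort_sym_asym_py : (List (String × Int)) := [("jesup", 1), ("jesdown", 2), ("nominal", 3)]

def Spec_sort_sym_asym_py (yields : List (String × Int)) (out : List String × List String) : Prop := out = sort_sym_asym_py_alt yields
instance (yields : List (String × Int)) (out : List String × List String) : Decidable (Spec_sort_sym_asym_py yields out) := by unfold Spec_sort_sym_asym_py; infer_instance

-- ===== CLAIM (what is proved, stated in full; the proofs are below) =====
def Claim_equal_sort_sym_asym_py : Prop := ∀ (yields : List (String × Int)), Dom_sort_sym_asym_py yields → Pre_sort_sym_asym_py yields → Spec_sort_sym_asym_py yields (sort_sym_asym_py yields)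

-- ===== LEMMAS AND PROOFS =====

-- y.endswith(p) as a suffix statement on code points
theorem pv_endswith_iff (y p : String) :
    PySem.Str.endswith y p = true ↔ p.toList <:+ y.toList := by
  rw [PySem.Str.endswith_eq, PySem.Chars.endswith_iff]

-- no string ends with both 'up' and 'down'
theorem pv_not_up_down (y : String) (hu : PySem.Str.endswith y "up" = true)
    (hd : PySem.Str.endswith y "down" = true) : False := by
  rw [pv_endswith_iff] at hu hd
  rcases List.suffix_or_suffix_of_suffix hu hd with h | h <;> revert h <;> decide

-- y[:-k] on code points, k = 2 or 4
theorem pv_strip_toList (y : String) (k : Nat) (hk : 1 < k) :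
    (PySem.Str.slice y none (some (-(k : Int)))).toList = y.toList.take (y.toList.length - k) := by
  rw [PySem.Str.toList_slice, PySem.Chars.slice_eq_listSlice,
    PySem.List.slice_to_neg_natCast _ _ (by omega)]

theorem pv_append_strip (y p : String) (hk : 1 < p.toList.length)
    (h : PySem.Str.endswith y p = true) :
    PySem.Str.slice y none (some (-(p.toList.length : Int))) ++ p = y := by
  rw [pv_endswith_iff] at h
  obtain ⟨t, ht⟩ := h
  rw [← String.toList_inj, String.toList_append, pv_strip_toList _ _ hk, ← ht]
  simp

theorem pv_endswith_append (x p : String) : PySem.Str.endswith (x ++ p) p = true := by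
  rw [pv_endswith_iff]; simp

-- B's partner-checking pass, when every up/down key in the segment has its partner in the dict,
-- never hits the raise path and accumulates exactly the non-up/down keys and the up-bases
theorem pv_loop_eq (d : PySem.Dict String Int) (ks : List String)
    (o u : PySem.Set String)
    (hup : ∀ y ∈ ks, PySem.Str.endswith y "up" = true →
      d.contains (PySem.Str.slice y none (some (-2)) ++ "down") = true)
    (hdn : ∀ y ∈ ks, PySem.Str.endswith y "down" = true →
      d.contains (PySem.Str.slice y none (some (-4)) ++ "up") = true) :
    ks.foldl
      (fun (st : Option (PySem.Set String × PySem.Set String)) (y : String) =>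
        match st with
        | none => none
        | some (other, bases) =>
          if PySem.Str.endswith y "up" then
            if d.contains (PySem.Str.slice y none (some (-2)) ++ "down") then
              some (other, PySem.Set.add bases (PySem.Str.slice y none (some (-2))))
            else none
          else if PySem.Str.endswith y "down" then
            if d.contains (PySem.Str.slice y none (some (-4)) ++ "up") then
              some (other, bases)
            else none
          else
            some (PySem.Set.add other y, bases)) (some (o, u))
    = some
      (PySem.Set.update o
        (ks.filter (fun y => !PySem.Str.endswith y "up" && !PySem.Str.endswith y "down")),
       PySem.Set.update u ((ks.filter (fun y => PySem.Str.endswith y "up")).map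
         (fun y => PySem.Str.slice y none (some (-2))))) := by
  induction ks generalizing o u with
  | nil => simp [PySem.Set.update]
  | cons y t ih =>
    rw [List.foldl_cons]
    by_cases hu : PySem.Str.endswith y "up" = true
    · have hd : PySem.Str.endswith y "down" = false := by
        cases hdd : PySem.Str.endswith y "down"
        · rfl
        · exact absurd (pv_not_up_down y hu hdd) (by simp)
      simp only [hu, if_pos, hup y (List.mem_cons_self) hu]
      rw [ih _ _ (fun z hz => hup z (List.mem_cons_of_mem _ hz))
            (fun z hz => hdn z (List.mem_cons_of_mem _ hz))]
      simp [hu, hd, PySem.Set.update_cons, -PySem.Str.endswith_eq]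
    · by_cases hd : PySem.Str.endswith y "down" = true
      · simp only [hu, hd, if_pos, Bool.false_eq_true, if_false,
          hdn y (List.mem_cons_self) hd]
        rw [ih _ _ (fun z hz => hup z (List.mem_cons_of_mem _ hz))
              (fun z hz => hdn z (List.mem_cons_of_mem _ hz))]
        simp [hu, hd, -PySem.Str.endswith_eq]
      · simp only [hu, hd, Bool.false_eq_true, if_false]
        rw [ih _ _ (fun z hz => hup z (List.mem_cons_of_mem _ hz))
              (fun z hz => hdn z (List.mem_cons_of_mem _ hz))]
        simp [hu, hd, PySem.Set.update_cons, -PySem.Str.endswith_eq]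

-- ===== VERDICT (by name: the statement is the Claim_ definition above) =====
theorem sort_sym_asym_py_spec : Claim_equal_sort_sym_asym_py := by
  intro yields _hdom hpre
  unfold Pre_sort_sym_asym_py at hpre
  rw [PySem.Set.equal_iff] at hpre
  unfold Spec_sort_sym_asym_py sort_sym_asym_py sort_sym_asym_py_alt
  have hnd : ((PySem.Dict.ofList yields).keys).Nodup := PySem.Dict.nodup_keys_ofList yields
  -- the two partner conditions follow from Pre_
  have hup : ∀ y ∈ (PySem.Dict.ofList yields).keys, PySem.Str.endswith y "up" = true →
      (PySem.Dict.ofList yields).contains (PySem.Str.slice y none (some (-2)) ++ "down") = true := by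
    intro y hy hu
    have h1 : PySem.Str.slice y none (some (-2)) ∈
        PySem.Set.ofList (((PySem.Dict.ofList yields).keys.filter
          (fun y => PySem.Str.endswith y "down")).map
          (fun y => PySem.Str.slice y none (some (-4)))) := by
      rw [← hpre, PySem.Set.mem_ofList]
      exact List.mem_map_of_mem (List.mem_filter.mpr ⟨hy, hu⟩)
    rw [PySem.Set.mem_ofList, List.mem_map] at h1
    obtain ⟨z, hz, hz2⟩ := h1
    obtain ⟨hzmem, hzdn⟩ := List.mem_filter.mp hz
    have h2 := pv_append_strip z "down" (by decide) hzdn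
    rw [show (-(("down".toList.length : Int))) = (-4 : Int) from by decide] at h2
    rw [PySem.Dict.contains_iff_mem_keys, ← hz2, h2]
    exact hzmem
  have hdn : ∀ y ∈ (PySem.Dict.ofList yields).keys, PySem.Str.endswith y "down" = true →
      (PySem.Dict.ofList yields).contains (PySem.Str.slice y none (some (-4)) ++ "up") = true := by
    intro y hy hd
    have h1 : PySem.Str.slice y none (some (-4)) ∈
        PySem.Set.ofList (((PySem.Dict.ofList yields).keys.filter
          (fun y => PySem.Str.endswith y "up")).map
          (fun y => PySem.Str.slice y none (some (-2)))) := by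
      rw [hpre, PySem.Set.mem_ofList]
      exact List.mem_map_of_mem (List.mem_filter.mpr ⟨hy, hd⟩)
    rw [PySem.Set.mem_ofList, List.mem_map] at h1
    obtain ⟨z, hz, hz2⟩ := h1
    obtain ⟨hzmem, hzup⟩ := List.mem_filter.mp hz
    have h2 := pv_append_strip z "up" (by decide) hzup
    rw [show (-(("up".toList.length : Int))) = (-2 : Int) from by decide] at h2
    rw [PySem.Dict.contains_iff_mem_keys, ← hz2, h2]
    exact hzmem
  simp only [pv_loop_eq (PySem.Dict.ofList yields) ((PySem.Dict.ofList yields).keys)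
    PySem.Set.empty PySem.Set.empty hup hdn]
  refine Prod.ext ?_ ?_
  · -- first components
    simp only [PySem.Set.empty, PySem.Set.update_nil_left,
      PySem.Set.ofList_eq_self_of_nodup _ hnd,
      PySem.Set.ofList_eq_self_of_nodup _ (hnd.filter _)]
    unfold PySem.Set.diff
    apply List.filter_congr
    intro y hy
    rw [← Bool.not_or]
    refine congrArg (fun b => !b) ?_
    rw [Bool.eq_iff_iff, PySem.Set.contains_iff, PySem.Set.mem_ofList, List.mem_flatMap,
      Bool.or_eq_true]
    constructor
    · rintro ⟨x, hx, hmem⟩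
      simp only [List.mem_cons, List.not_mem_nil, or_false] at hmem
      rcases hmem with rfl | rfl
      · right; exact pv_endswith_append x "down"
      · left; exact pv_endswith_append x "up"
    · intro h
      rcases h with hu | hd
      · refine ⟨PySem.Str.slice y none (some (-2)), ?_, ?_⟩
        · rw [PySem.Set.mem_ofList]
          exact List.mem_map_of_mem (List.mem_filter.mpr ⟨hy, hu⟩)
        · have h2 := pv_append_strip y "up" (by decide) hu
          rw [show (-(("up".toList.length : Int))) = (-2 : Int) from by decide] at h2
          rw [h2]; simp
      · refine ⟨PySem.Str.slice y none (some (-4)), ?_, ?_⟩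
        · have hin : PySem.Str.slice y none (some (-4)) ∈
              PySem.Set.ofList
                ((((PySem.Dict.ofList yields).keys).filter
                  (fun y => PySem.Str.endswith y "down")).map
                  (fun y => PySem.Str.slice y none (some (-4)))) := by
            rw [PySem.Set.mem_ofList]
            exact List.mem_map_of_mem (List.mem_filter.mpr ⟨hy, hd⟩)
          exact (hpre _).mpr hin
        · have h2 := pv_append_strip y "down" (by decide) hd
          rw [show (-(("down".toList.length : Int))) = (-4 : Int) from by decide] at h2
          rw [h2]; simp
  · simp only [PySem.Set.empty, PySem.Set.update_nil_left]
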